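-- pv_equiv track=rewrite | github.com/basboot/project_euler | problem896.py | first_illegal_number
-- ===== SOURCE A (Python) =====
-- def first_illegal_number(start, end):
--     for n in range(start, end, 2 if end > start else -2): # start is always odd
--         # we can skip 2, because we only look at odd  numbers
--         if n % 3 == 0 or\
--                 n % 5 == 0 or\
--                 n % 7 == 0 or\
--                 n % 11 == 0 or\
--                 n % 13 == 0 or\
--                 n % 17 == 0 or\
--                 n % 19 == 0 or\
--                 n % 23 == 0 or\
--                 n % 29 == 0 or\
--                 n % 31 == 0:
--             continue
--         return n
--     return end # not shorter
-- ===== SOURCE B (Python) =====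
-- # B: an incremental sieve instead of per-candidate trial division. For each prime p the range
-- # positions k whose value start + k*step is divisible by p form an arithmetic progression with
-- # period p; B precomputes each progression's first position and advances these ten pointers,
-- # returning the value of the first position no pointer hits (objective: alternative).
-- _PRIMES = (3, 5, 7, 11, 13, 17, 19, 23, 29, 31)
--
-- def _first_hit(start, step, p):
--     # least k >= 0 with start + k*step divisible by p (exists since gcd(step, p) == 1)
--     k = 0
--     while (start + k * step) % p != 0:
--         k += 1
--     return k
--
-- def first_illegal_number(start, end):
--     step = 2 if end > start else -2
--     n_steps = (end - start + 1) // 2 if end > start else (start - end + 1) // 2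
--     streams = [(_first_hit(start, step, p), p) for p in _PRIMES]
--     k = 0
--     while k < n_steps:
--         if any(x == k for x, _ in streams):
--             streams = [(x + p, p) if x == k else (x, p) for x, p in streams]
--             k += 1
--         else:
--             return start + k * step
--     return end
-- ===== Notes on version B (the rewrite author's own statement) =====
-- stated objective: alternative
-- what changed: Instead of trial-dividing each candidate by the ten primes, B runs an incremental sieve: for each prime the divisible range positions form an arithmetic progression of period p, so B precomputes each progression's first position and advances these ten pointers, returning the value at the first position no pointer hits.
import Mathlib
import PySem

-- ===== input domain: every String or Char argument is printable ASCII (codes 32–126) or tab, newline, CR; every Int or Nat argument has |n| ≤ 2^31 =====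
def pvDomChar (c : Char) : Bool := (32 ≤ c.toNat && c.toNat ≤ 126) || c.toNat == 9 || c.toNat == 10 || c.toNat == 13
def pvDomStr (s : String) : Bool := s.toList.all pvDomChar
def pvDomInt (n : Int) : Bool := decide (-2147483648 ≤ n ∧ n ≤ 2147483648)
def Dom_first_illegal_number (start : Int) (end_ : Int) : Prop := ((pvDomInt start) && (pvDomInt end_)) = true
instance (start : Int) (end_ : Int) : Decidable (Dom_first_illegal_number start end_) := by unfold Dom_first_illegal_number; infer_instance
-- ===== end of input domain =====

-- B replaces A's per-candidate trial division by an incremental sieve: per prime, the divisible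
-- range positions form an arithmetic progression whose pointer is advanced as positions pass
-- (objective: alternative; equivalence proved on all inputs).

-- ===== PORT A =====
-- Python's len(range(start, end, ±2)), matching the sign of the step A chooses
def pvRangeCount (start end_ step : Int) : Nat :=
  if step > 0 then (PySem.Int.floordiv (end_ - start + 1) 2).toNat
  else (PySem.Int.floordiv (start - end_ + 1) 2).toNat

-- the for-loop of A: first n in the range not divisible by any of the ten primes, else end
def pvLoopA : Nat → Int → Int → Int → Int
  | 0, _, _, e => e
  | k+1, n, step, e =>
    if (PySem.Int.mod n 3 == 0 || PySem.Int.mod n 5 == 0 || PySem.Int.mod n 7 == 0 ||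
        PySem.Int.mod n 11 == 0 || PySem.Int.mod n 13 == 0 || PySem.Int.mod n 17 == 0 ||
        PySem.Int.mod n 19 == 0 || PySem.Int.mod n 23 == 0 || PySem.Int.mod n 29 == 0 ||
        PySem.Int.mod n 31 == 0) then pvLoopA k (n + step) step e
    else n

def first_illegal_number (start : Int) (end_ : Int) : Int :=
  let step : Int := if end_ > start then 2 else -2
  pvLoopA (pvRangeCount start end_ step) start step end_

-- ===== PORT B =====
def pvPrimes : List Int := [3, 5, 7, 11, 13, 17, 19, 23, 29, 31]

-- Source B's _first_hit: the while loop, with fuel p (the hit exists below p, proved below)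
def pvFirstHit : Nat → Int → Int → Int → Int → Int
  | 0, _, _, _, k => k
  | f+1, s, step, p, k =>
    if PySem.Int.mod (s + k * step) p != 0 then pvFirstHit f s step p (k+1) else k

-- Source B's main while loop: fuel = n_steps - k remaining positions, k the current position
def pvLoopB : Nat → Int → List (Int × Int) → Int → Int → Int → Int
  | 0, _, _, _, _, e => e
  | m+1, k, streams, s, step, e =>
    if streams.any (fun xp => xp.1 == k) then
      pvLoopB m (k+1) (streams.map (fun xp => if xp.1 == k then (xp.1 + xp.2, xp.2) else xp)) s step e
    else s + k * step

def first_illegal_number_alt (start : Int) (end_ : Int) : Int :=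
  let step : Int := if end_ > start then 2 else -2
  let nSteps : Int := if end_ > start then PySem.Int.floordiv (end_ - start + 1) 2
                      else PySem.Int.floordiv (start - end_ + 1) 2
  let streams : List (Int × Int) := pvPrimes.map (fun p => (pvFirstHit p.toNat start step p 0, p))
  pvLoopB nSteps.toNat 0 streams start step end_

-- ===== PRECONDITION & SPEC =====
def Spec_first_illegal_number (start : Int) (end_ : Int) (out : Int) : Prop := out = first_illegal_number_alt start end_
instance (start : Int) (end_ : Int) (out : Int) : Decidable (Spec_first_illegal_number start end_ out) := by unfold Spec_first_illegal_number; infer_instance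

-- ===== CLAIM (what is proved, stated in full; the proofs are below) =====
def Claim_equal_first_illegal_number : Prop := ∀ (start : Int) (end_ : Int), Dom_first_illegal_number start end_ → Spec_first_illegal_number start end_ (first_illegal_number start end_)

-- ===== LEMMAS AND PROOFS =====

-- the stream invariant: x is the least position ≥ k whose value s + x*step is divisible by p
def pvInv (s step k x p : Int) : Prop :=
  k ≤ x ∧ p ∣ s + x * step ∧ ∀ t : Int, k ≤ t → t < x → ¬ p ∣ s + t * step

theorem prime_facts : ∀ p ∈ pvPrimes, Prime p ∧ (0:Int) < p ∧ ¬ p ∣ (2:Int) ∧ 2 * ((p+1)/2) = p + 1 := by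
  intro p hp
  fin_cases hp <;> refine ⟨by norm_num, by norm_num, ?_, by norm_num⟩ <;> decide

theorem step_not_dvd {p step : Int} (h2 : ¬ p ∣ (2:Int)) (hstep : step = 2 ∨ step = -2) :
    ¬ p ∣ step := by
  rcases hstep with h | h <;> subst h
  · exact h2
  · simpa using h2

theorem hit_congr {p s step t k : Int} (hp : Prime p) (hstep : ¬ p ∣ step)
    (h1 : p ∣ s + k * step) (h2 : p ∣ s + t * step) : p ∣ (t - k) := by
  have hd : p ∣ (t - k) * step := by
    have := dvd_sub h2 h1
    have he : s + t * step - (s + k * step) = (t - k) * step := by ring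
    rwa [he] at this
  exact (hp.dvd_mul.mp hd).resolve_right hstep

theorem inv_hit {s step k p : Int} (hp : Prime p) (hstep : ¬ p ∣ step) (hpos : 0 < p)
    (h : pvInv s step k k p) : pvInv s step (k+1) (k+p) p := by
  obtain ⟨-, hdvd, -⟩ := h
  refine ⟨by omega, ?_, ?_⟩
  · have : s + (k + p) * step = (s + k * step) + p * step := by ring
    rw [this]; exact dvd_add hdvd ⟨step, rfl⟩
  · intro t ht1 ht2 hdt
    have := hit_congr hp hstep hdvd hdt
    have hle := Int.le_of_dvd (by omega) this
    omega

theorem inv_miss {s step k x p : Int} (h : pvInv s step k x p) (hne : x ≠ k) :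
    pvInv s step (k+1) x p := by
  obtain ⟨h1, h2, h3⟩ := h
  exact ⟨by omega, h2, fun t ht1 ht2 => h3 t (by omega) ht2⟩

theorem inv_det {s step k x p : Int} (h : pvInv s step k x p) :
    x = k ↔ p ∣ s + k * step := by
  constructor
  · rintro rfl; exact h.2.1
  · intro hd
    by_contra hne
    exact h.2.2 k le_rfl (lt_of_le_of_ne h.1 (Ne.symm hne)) hd

theorem firstHit_inv {s step p : Int} :
    ∀ (f : Nat) (k : Int), (∃ r : Nat, r < f ∧ p ∣ s + (k + r) * step) →
      pvInv s step k (pvFirstHit f s step p k) p := by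
  intro f
  induction f with
  | zero => rintro k ⟨r, hr, -⟩; exact absurd hr (Nat.not_lt_zero r)
  | succ f ih =>
    rintro k ⟨r, hr, hdvd⟩
    by_cases hk : p ∣ s + k * step
    · have hmod : (PySem.Int.mod (s + k * step) p != 0) = false := by
        simp [PySem.Int.mod_eq_zero_iff_dvd, hk]
      simp only [pvFirstHit]
      rw [hmod, if_neg (by simp)]
      exact ⟨le_rfl, hk, fun t ht1 ht2 => absurd ht2 (by omega)⟩
    · have hmod : (PySem.Int.mod (s + k * step) p != 0) = true := by
        simp [PySem.Int.mod_eq_zero_iff_dvd, hk]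
      have hr0 : r ≠ 0 := by rintro rfl; exact hk (by simpa using hdvd)
      have hrec := ih (k+1) ⟨r - 1, by omega, by
        have hc : (k + 1 + ((r - 1 : Nat) : Int)) = k + r := by omega
        rwa [hc]⟩
      simp only [pvFirstHit]
      rw [hmod, if_pos rfl]
      refine ⟨by have := hrec.1; omega, hrec.2.1, fun t ht1 ht2 => ?_⟩
      rcases eq_or_lt_of_le ht1 with rfl | hlt
      · exact hk
      · exact hrec.2.2 t (by omega) ht2

-- existence of a hit below p, via the explicit inverse (p+1)/2 of 2 modulo an odd p
theorem exists_hit {s p step : Int} (hpos : 0 < p) (hodd : 2 * ((p+1)/2) = p + 1)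
    (hstep : step = 2 ∨ step = -2) :
    ∃ r : Nat, r < p.toNat ∧ p ∣ s + (0 + (r : Int)) * step := by
  have hm := hodd
  rcases hstep with rfl | rfl
  · set a : Int := -s * ((p+1)/2) with ha
    set r0 : Int := a % p with hr0
    have h0 : 0 ≤ r0 := Int.emod_nonneg a (by omega)
    have hlt : r0 < p := Int.emod_lt_of_pos a hpos
    have h1 : p ∣ a - r0 := ⟨a / p, by
      have := Int.emod_add_mul_ediv a p; linarith⟩
    have h2 : p ∣ s + a * 2 := ⟨-s, by rw [ha]; linear_combination (-s) * hm⟩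
    refine ⟨r0.toNat, by omega, ?_⟩
    have hcast : ((r0.toNat : Int)) = r0 := Int.toNat_of_nonneg h0
    rw [hcast]
    have heq : s + (0 + r0) * 2 = (s + a * 2) - (a - r0) * 2 := by ring
    rw [heq]
    exact dvd_sub h2 (h1.mul_right 2)
  · set a : Int := s * ((p+1)/2) with ha
    set r0 : Int := a % p with hr0
    have h0 : 0 ≤ r0 := Int.emod_nonneg a (by omega)
    have hlt : r0 < p := Int.emod_lt_of_pos a hpos
    have h1 : p ∣ a - r0 := ⟨a / p, by
      have := Int.emod_add_mul_ediv a p; linarith⟩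
    have h2 : p ∣ s + a * (-2) := ⟨-s, by rw [ha]; linear_combination (-s) * hm⟩
    refine ⟨r0.toNat, by omega, ?_⟩
    have hcast : ((r0.toNat : Int)) = r0 := Int.toNat_of_nonneg h0
    rw [hcast]
    have heq : s + (0 + r0) * (-2) = (s + a * (-2)) + (a - r0) * 2 := by ring
    rw [heq]
    exact dvd_add h2 (h1.mul_right 2)

-- the ten divisibility tests of A's loop body, as a proposition
theorem condA_iff (n : Int) :
    (PySem.Int.mod n 3 == 0 || PySem.Int.mod n 5 == 0 || PySem.Int.mod n 7 == 0 ||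
     PySem.Int.mod n 11 == 0 || PySem.Int.mod n 13 == 0 || PySem.Int.mod n 17 == 0 ||
     PySem.Int.mod n 19 == 0 || PySem.Int.mod n 23 == 0 || PySem.Int.mod n 29 == 0 ||
     PySem.Int.mod n 31 == 0) = true ↔ ∃ p ∈ pvPrimes, p ∣ n := by
  simp only [Bool.or_eq_true, beq_iff_eq, PySem.Int.mod_eq_zero_iff_dvd, pvPrimes]
  simp only [List.mem_cons, List.not_mem_nil, or_false]
  constructor
  · rintro (((((((((h|h)|h)|h)|h)|h)|h)|h)|h)|h)
    · exact ⟨3, by tauto, h⟩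
    · exact ⟨5, by tauto, h⟩
    · exact ⟨7, by tauto, h⟩
    · exact ⟨11, by tauto, h⟩
    · exact ⟨13, by tauto, h⟩
    · exact ⟨17, by tauto, h⟩
    · exact ⟨19, by tauto, h⟩
    · exact ⟨23, by tauto, h⟩
    · exact ⟨29, by tauto, h⟩
    · exact ⟨31, by tauto, h⟩
  · rintro ⟨p, hp, hd⟩
    rcases hp with rfl|rfl|rfl|rfl|rfl|rfl|rfl|rfl|rfl|rfl <;> tauto

-- the main simulation: A's value loop and B's pointer loop agree under the stream invariant
theorem loop_eq (s step e : Int) (hstep : step = 2 ∨ step = -2) :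
    ∀ (m : Nat) (k : Int) (streams : List (Int × Int)),
      streams.map Prod.snd = pvPrimes →
      (∀ xp ∈ streams, pvInv s step k xp.1 xp.2) →
      pvLoopA m (s + k * step) step e = pvLoopB m k streams s step e := by
  intro m
  induction m with
  | zero => intro k streams _ _; rfl
  | succ m ih =>
    intro k streams hmap hinv
    have hcond : (PySem.Int.mod (s + k * step) 3 == 0 || PySem.Int.mod (s + k * step) 5 == 0 ||
        PySem.Int.mod (s + k * step) 7 == 0 || PySem.Int.mod (s + k * step) 11 == 0 ||
        PySem.Int.mod (s + k * step) 13 == 0 || PySem.Int.mod (s + k * step) 17 == 0 ||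
        PySem.Int.mod (s + k * step) 19 == 0 || PySem.Int.mod (s + k * step) 23 == 0 ||
        PySem.Int.mod (s + k * step) 29 == 0 || PySem.Int.mod (s + k * step) 31 == 0) =
        streams.any (fun xp => xp.1 == k) := by
      rw [Bool.eq_iff_iff, condA_iff, List.any_eq_true]
      constructor
      · rintro ⟨p, hp, hd⟩
        rw [← hmap] at hp
        obtain ⟨xp, hxp, hsnd⟩ := List.mem_map.mp hp
        exact ⟨xp, hxp, by
          simp only [beq_iff_eq]
          exact (inv_det (hinv xp hxp)).mpr (by rwa [hsnd])⟩
      · rintro ⟨xp, hxp, hxk⟩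
        simp only [beq_iff_eq] at hxk
        exact ⟨xp.2, by rw [← hmap]; exact List.mem_map_of_mem hxp,
          (inv_det (hinv xp hxp)).mp hxk⟩
    simp only [pvLoopA, pvLoopB, hcond]
    by_cases hb : (streams.any fun xp => xp.1 == k) = true
    · rw [if_pos hb, if_pos hb]
      have harg : s + k * step + step = s + (k + 1) * step := by ring
      rw [harg]
      apply ih
      · rw [List.map_map, ← hmap]
        apply List.map_congr_left
        intro xp _
        by_cases h : xp.1 = k <;> simp [h]
      · intro xp hxp
        obtain ⟨yp, hyp, hupd⟩ := List.mem_map.mp hxp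
        have hinvy := hinv yp hyp
        have hpfacts := prime_facts yp.2 (by rw [← hmap]; exact List.mem_map_of_mem hyp)
        by_cases h : yp.1 = k
        · rw [if_pos (by simpa using h)] at hupd
          subst hupd
          have hkk : pvInv s step k k yp.2 := by rwa [h] at hinvy
          have hh := inv_hit hpfacts.1 (step_not_dvd hpfacts.2.2.1 hstep) hpfacts.2.1 hkk
          simpa [h] using hh
        · rw [if_neg (by simpa using h)] at hupd
          subst hupd
          exact inv_miss hinvy h
    · rw [if_neg hb, if_neg hb]

-- assembling both ports for a fixed step and count
theorem final_eq (s e step : Int) (hstep : step = 2 ∨ step = -2) (m : Nat) :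
    pvLoopA m s step e =
      pvLoopB m 0 (pvPrimes.map (fun p => (pvFirstHit p.toNat s step p 0, p))) s step e := by
  have h0 : s + 0 * step = s := by ring
  rw [← h0]
  rw [h0]  -- restore the occurrences inside the stream initialisation
  conv_lhs => rw [← h0]
  apply loop_eq s step e hstep
  · simp [pvPrimes]
  · intro xp hxp
    simp only [pvPrimes, List.map_cons, List.map_nil, List.mem_cons, List.not_mem_nil,
      or_false] at hxp
    have key : ∀ p : Int, 0 < p → 2 * ((p+1)/2) = p + 1 →
        pvInv s step 0 (pvFirstHit p.toNat s step p 0) p := by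
      intro p hpos hodd
      exact firstHit_inv p.toNat 0 (exists_hit hpos hodd hstep)
    rcases hxp with rfl|rfl|rfl|rfl|rfl|rfl|rfl|rfl|rfl|rfl <;>
      exact key _ (by norm_num) (by norm_num)

-- ===== VERDICT (by name: the statement is the Claim_ definition above) =====
theorem first_illegal_number_spec : Claim_equal_first_illegal_number := by
  intro start end_ _
  unfold Spec_first_illegal_number first_illegal_number first_illegal_number_alt pvRangeCount
  dsimp only
  by_cases h : end_ > start
  · rw [if_pos h, if_pos h, if_pos (by norm_num : (2:Int) > 0)]
    exact final_eq start end_ 2 (Or.inl rfl) _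
  · rw [if_neg h, if_neg h, if_neg (by norm_num : ¬ (-2:Int) > 0)]
    exact final_eq start end_ (-2) (Or.inr rfl) _
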